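-- pv_equiv track=rewrite | github.com/charlielockyer-rice/bscs-bench-public | comp182/tests/test_module6.py | _is_rdst
-- ===== SOURCE A (Python) =====
-- def _is_rdst(rgraph, root, all_nodes):
--     """
--     Check that rgraph (reversed representation) is a valid RDST:
--     - Every non-root node has exactly one incoming edge
--     - Root has no incoming edges
--     - The graph is connected (forms a tree rooted at root)
--     """
--     # Check root has no incoming edges
--     if rgraph.get(root, {}):
--         return False
--     # Check every non-root node has exactly one incoming edge
--     for node in all_nodes:
--         if node == root:
--             continue
--         if node not in rgraph or len(rgraph[node]) != 1:
--             return False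
--     # Check connectivity: build standard representation and BFS from root
--     std = {}
--     for node in all_nodes:
--         std[node] = {}
--     for node in rgraph:
--         for src in rgraph[node]:
--             std[src][node] = rgraph[node][src]
--     visited = set()
--     queue = [root]
--     while queue:
--         current = queue.pop(0)
--         if current in visited:
--             continue
--         visited.add(current)
--         for nbr in std.get(current, {}):
--             if nbr not in visited:
--                 queue.append(nbr)
--     return visited == set(all_nodes)
-- ===== SOURCE B (Python) =====
-- def _is_rdst(rgraph, root, all_nodes):
--     # Check root has no incoming edges
--     if rgraph.get(root, {}):
--         return False
--     # Check every non-root node has exactly one incoming edge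
--     for node in all_nodes:
--         if node != root and (node not in rgraph or len(rgraph[node]) != 1):
--             return False
--     nodes = set(all_nodes)
--     # root itself must be one of the nodes
--     if root not in nodes:
--         return False
--     # rgraph must not mention edge targets outside all_nodes
--     for node, preds in rgraph.items():
--         if preds and node not in nodes:
--             return False
--     # connectivity: every node's unique parent chain must climb to root
--     good = {root}
--     for node in all_nodes:
--         seen = set()
--         cur = node
--         while cur not in good:
--             if cur in seen:
--                 return False  # hit a cycle that never reaches root
--             seen.add(cur)
--             (cur,) = rgraph[cur]
--         good |= seen
--     return True
-- ===== Notes on version B (the rewrite author's own statement) =====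
-- stated objective: alternative
-- what changed: The connectivity test no longer builds a forward adjacency dict and runs BFS from the root; instead each node climbs its unique parent chain (the single key of rgraph[node]) to the root, with a per-walk seen-set for cycle detection and a memo set of known-good nodes, plus an explicit check that rgraph mentions no edge targets outside all_nodes and that root is in all_nodes.
import Mathlib
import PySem

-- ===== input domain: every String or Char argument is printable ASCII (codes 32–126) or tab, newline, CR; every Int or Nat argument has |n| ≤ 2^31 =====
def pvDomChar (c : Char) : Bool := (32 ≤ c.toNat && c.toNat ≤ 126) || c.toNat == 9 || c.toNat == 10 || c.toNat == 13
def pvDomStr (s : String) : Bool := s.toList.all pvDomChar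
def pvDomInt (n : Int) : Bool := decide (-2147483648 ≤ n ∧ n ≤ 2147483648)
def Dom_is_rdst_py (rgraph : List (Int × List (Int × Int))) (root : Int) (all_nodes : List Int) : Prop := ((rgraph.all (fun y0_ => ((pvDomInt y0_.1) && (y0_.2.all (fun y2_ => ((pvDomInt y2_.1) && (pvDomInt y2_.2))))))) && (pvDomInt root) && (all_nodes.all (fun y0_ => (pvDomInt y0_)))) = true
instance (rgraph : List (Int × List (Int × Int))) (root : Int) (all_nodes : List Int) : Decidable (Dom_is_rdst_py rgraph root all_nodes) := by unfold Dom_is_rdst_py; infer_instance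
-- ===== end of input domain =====

-- B replaces A's "build forward graph + BFS from root" connectivity test by climbing each
-- node's unique parent chain to the root with cycle detection and a memo of known-good nodes
-- (objective: alternative algorithm, same checks, no BFS and no forward graph).

-- ===== PORT A =====

-- both Pythons receive `rgraph` as a dict of dicts: decode the association list once
def pvDict (rgraph : List (Int × List (Int × Int))) : PySem.Dict Int (PySem.Dict Int Int) :=
  PySem.Dict.ofList (rgraph.map (fun p => (p.1, PySem.Dict.ofList p.2)))

-- `for src in rgraph[node]: std[src][node] = rgraph[node][src]`; none = Python's KeyError
-- on `std[src]` (outside Pre_)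
def pvAddEdges (node : Int) (std : PySem.Dict Int (PySem.Dict Int Int)) :
    List (Int × Int) → Option (PySem.Dict Int (PySem.Dict Int Int))
  | [] => some std
  | (src, w) :: rest =>
    if std.contains src then
      pvAddEdges node (std.modify src PySem.Dict.empty (fun m => m.insert node w)) rest
    else none

def pvBuildStd : List (Int × PySem.Dict Int Int) → PySem.Dict Int (PySem.Dict Int Int) →
    Option (PySem.Dict Int (PySem.Dict Int Int))
  | [], std => some std
  | (node, preds) :: rest, std =>
    match pvAddEdges node std preds.items with
    | none => none
    | some std' => pvBuildStd rest std'

-- A's `while queue:` loop; the fuel passed below is proved sufficient, so the 0-fuel arm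
-- is never reached on any input
def pvBFS (std : PySem.Dict Int (PySem.Dict Int Int)) :
    Nat → PySem.Set Int → List Int → PySem.Set Int
  | _, visited, [] => visited
  | 0, visited, _ :: _ => visited
  | fuel + 1, visited, c :: queue =>
    if PySem.Set.contains visited c then pvBFS std fuel visited queue
    else
      pvBFS std fuel (PySem.Set.add visited c)
        (queue ++ ((std.getD c PySem.Dict.empty).keys.filter
          (fun n => !PySem.Set.contains (PySem.Set.add visited c) n)))

def is_rdst_py (rgraph : List (Int × List (Int × Int))) (root : Int) (all_nodes : List Int) : Bool :=
  let D := pvDict rgraph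
  if (D.getD root PySem.Dict.empty).size ≠ 0 then false
  else if !(all_nodes.all (fun node =>
      node == root || (D.contains node && (D.getD node PySem.Dict.empty).size == 1))) then false
  else
    match pvBuildStd D.items
        (all_nodes.foldl (fun s n => s.insert n PySem.Dict.empty) PySem.Dict.empty) with
    | none => false  -- Python raises KeyError here; excluded by Pre_
    | some std =>
      PySem.Set.equal
        (pvBFS std ((D.keys.length + 1) * (D.keys.length + 2) + 1) PySem.Set.empty [root])
        (PySem.Set.ofList all_nodes)

-- ===== PORT B =====

-- `(cur,) = rgraph[cur]`: the unique key; none = Python raises (outside Pre_)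
def pvParent (D : PySem.Dict Int (PySem.Dict Int Int)) (cur : Int) : Option Int :=
  match (D.getD cur PySem.Dict.empty).keys with
  | [p] => some p
  | _ => none

-- the `while cur not in good:` loop; fuel |all_nodes|+1 is proved sufficient (the chain
-- repeats or ends within that many steps), so the 0-fuel arm is never reached
def pvWalk (D : PySem.Dict Int (PySem.Dict Int Int)) (good : PySem.Set Int) :
    Nat → PySem.Set Int → Int → Option (PySem.Set Int)
  | 0, _, _ => none
  | fuel + 1, seen, cur =>
    if PySem.Set.contains good cur then some seen
    else if PySem.Set.contains seen cur then none
    else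
      match pvParent D cur with
      | some p => pvWalk D good fuel (PySem.Set.add seen cur) p
      | none => none

def pvClimb (D : PySem.Dict Int (PySem.Dict Int Int)) (fuel : Nat) :
    PySem.Set Int → List Int → Bool
  | _, [] => true
  | good, n :: rest =>
    match pvWalk D good fuel PySem.Set.empty n with
    | none => false
    | some seen => pvClimb D fuel (PySem.Set.update good seen) rest

def is_rdst_py_alt (rgraph : List (Int × List (Int × Int))) (root : Int) (all_nodes : List Int) : Bool :=
  let D := pvDict rgraph
  if (D.getD root PySem.Dict.empty).size ≠ 0 then false
  else if !(all_nodes.all (fun node =>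
      node == root || (D.contains node && (D.getD node PySem.Dict.empty).size == 1))) then false
  else if !(PySem.Set.contains (PySem.Set.ofList all_nodes) root) then false
  else if D.items.any (fun p =>
      p.2.size != 0 && !(PySem.Set.contains (PySem.Set.ofList all_nodes) p.1)) then false
  else pvClimb D (all_nodes.length + 1) (PySem.Set.add PySem.Set.empty root) all_nodes

-- ===== PRECONDITION & SPEC =====

-- Pre_ excludes exactly the inputs on which Python A raises a KeyError while building the
-- standard representation: those where both degree checks pass yet some edge source is not
-- a member of all_nodes.
def Pre_is_rdst_py (rgraph : List (Int × List (Int × Int))) (root : Int) (all_nodes : List Int) : Prop :=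
  (((pvDict rgraph).getD root PySem.Dict.empty).size = 0 ∧
    ∀ n ∈ all_nodes, n ≠ root →
      (pvDict rgraph).contains n = true ∧
      ((pvDict rgraph).getD n PySem.Dict.empty).size = 1) →
  ∀ p ∈ (pvDict rgraph).items, ∀ q ∈ p.2.items, q.1 ∈ all_nodes

instance (rgraph : List (Int × List (Int × Int))) (root : Int) (all_nodes : List Int) : Decidable (Pre_is_rdst_py rgraph root all_nodes) := by unfold Pre_is_rdst_py; infer_instance

def pvWitness_is_rdst_py : (List (Int × List (Int × Int))) × Int × List Int :=
  ([(1, [(0, 5)]), (2, [(1, 7)])], 0, [0, 1, 2])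

def Spec_is_rdst_py (rgraph : List (Int × List (Int × Int))) (root : Int) (all_nodes : List Int) (out : Bool) : Prop := out = is_rdst_py_alt rgraph root all_nodes
instance (rgraph : List (Int × List (Int × Int))) (root : Int) (all_nodes : List Int) (out : Bool) : Decidable (Spec_is_rdst_py rgraph root all_nodes out) := by unfold Spec_is_rdst_py; infer_instance

-- ===== CLAIM (what is proved, stated in full; the proofs are below) =====
def Claim_equal_is_rdst_py : Prop := ∀ (rgraph : List (Int × List (Int × Int))) (root : Int) (all_nodes : List Int), Dom_is_rdst_py rgraph root all_nodes → Pre_is_rdst_py rgraph root all_nodes → Spec_is_rdst_py rgraph root all_nodes (is_rdst_py rgraph root all_nodes)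

-- ===== LEMMAS AND PROOFS =====

-- the parent chain: parIter D k x follows the unique-predecessor map k times
def parIter (D : PySem.Dict Int (PySem.Dict Int Int)) : Nat → Int → Option Int
  | 0, x => some x
  | k + 1, x =>
    match pvParent D x with
    | some p => parIter D k p
    | none => none

-- "x's parent chain reaches R"
def pvReaches (D : PySem.Dict Int (PySem.Dict Int Int)) (R x : Int) : Prop :=
  ∃ k, parIter D k x = some R

theorem pv_nodup_subset_length {l t : List Int} (hn : l.Nodup) (hs : ∀ x ∈ l, x ∈ t) :
    l.length ≤ t.length := by
  calc l.length = l.toFinset.card := (List.toFinset_card_of_nodup hn).symm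
    _ ≤ t.toFinset.card := Finset.card_le_card (by
        intro x hx
        rw [List.mem_toFinset] at hx ⊢
        exact hs x hx)
    _ ≤ t.length := t.toFinset_card_le

theorem parIter_add (D : PySem.Dict Int (PySem.Dict Int Int)) (a b : Nat) (x : Int) :
    parIter D (a + b) x = (parIter D a x).bind (parIter D b) := by
  induction a generalizing x with
  | zero => simp [parIter]
  | succ a ih =>
    have : a + 1 + b = (a + b) + 1 := by omega
    rw [this]
    simp only [parIter]
    cases h : pvParent D x with
    | none => simp
    | some p => simpa using ih p

theorem parIter_succ_of_parent (D : PySem.Dict Int (PySem.Dict Int Int)) {x p : Int}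
    (h : pvParent D x = some p) (k : Nat) : parIter D (k + 1) x = parIter D k p := by
  simp [parIter, h]

theorem pv_no_reach_of_cycle {D : PySem.Dict Int (PySem.Dict Int Int)} {R x : Int} {k : Nat}
    (hR : pvParent D R = none) (hk : 0 < k) (hc : parIter D k x = some x) :
    ¬ pvReaches D R x := by
  rintro ⟨r, hr⟩
  have hmul : ∀ q : Nat, parIter D (q * k) x = some x := by
    intro q
    induction q with
    | zero => simp [parIter]
    | succ q ih =>
      have : (q + 1) * k = q * k + k := by ring
      rw [this, parIter_add, ih]
      simpa using hc
  have hnone : ∀ s : Nat, parIter D (r + 1 + s) x = none := by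
    intro s
    have h1 : parIter D (r + 1) x = none := by
      rw [parIter_add, hr]
      simp [parIter, hR]
    rw [parIter_add, h1]
    rfl
  have hge : r + 1 ≤ (r + 1) * k := Nat.le_mul_of_pos_right _ hk
  obtain ⟨m, hm⟩ : ∃ m, (r + 1) * k = r + 1 + m := ⟨(r + 1) * k - (r + 1), by omega⟩
  have := hmul (r + 1)
  rw [hm, hnone m] at this
  cases this

theorem pv_reach_bound {D : PySem.Dict Int (PySem.Dict Int Int)} {R x : Int} {N : List Int}
    (hx : x ∈ N)
    (hpar : ∀ n ∈ N, n ≠ R → ∃ p, pvParent D n = some p ∧ p ∈ N)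
    (h : pvReaches D R x) : ∃ k, k + 1 ≤ N.length ∧ parIter D k x = some R := by
  classical
  let k := Nat.find h
  have hk : parIter D k x = some R := Nat.find_spec h
  have hmin : ∀ j < k, parIter D j x ≠ some R := fun j hj => Nat.find_min h hj
  -- every prefix value of the chain exists and lies in N
  have hval : ∀ i ≤ k, ∃ y, parIter D i x = some y ∧ y ∈ N := by
    intro i hi
    induction i with
    | zero => exact ⟨x, rfl, hx⟩
    | succ i ih =>
      obtain ⟨y, hy, hyN⟩ := ih (by omega)
      have hyR : y ≠ R := by
        intro hEq
        exact hmin i (by omega) (hEq ▸ hy)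
      obtain ⟨p, hp, hpN⟩ := hpar y hyN hyR
      refine ⟨p, ?_, hpN⟩
      have : parIter D (i + 1) x = (parIter D i x).bind (parIter D 1) := parIter_add D i 1 x
      rw [this, hy]
      simp [parIter, hp]
  -- the k+1 chain values are distinct members of N
  refine ⟨k, ?_, hk⟩
  have hinj : ∀ i ≤ k, ∀ j ≤ k, parIter D i x = parIter D j x → i = j := by
    intro i hi j hj hEq
    by_contra hne
    rcases Nat.lt_or_ge i j with hij | hij
    · obtain ⟨y, hy, _⟩ := hval j hj
      have h1 : parIter D (i + (k - j)) x = some R := by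
        rw [parIter_add, hEq, hy]
        have : parIter D (k - j) y = some R := by
          have := parIter_add D j (k - j) x
          rw [hy] at this
          have hkj : j + (k - j) = k := by omega
          rw [hkj, hk] at this
          exact this.symm
        simpa using this
      exact hmin (i + (k - j)) (by omega) h1
    · have hij' : j < i := by omega
      obtain ⟨y, hy, _⟩ := hval i hi
      have h1 : parIter D (j + (k - i)) x = some R := by
        rw [parIter_add, ← hEq, hy]
        have : parIter D (k - i) y = some R := by
          have := parIter_add D i (k - i) x
          rw [hy] at this
          have hki : i + (k - i) = k := by omega
          rw [hki, hk] at this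
          exact this.symm
        simpa using this
      exact hmin (j + (k - i)) (by omega) h1
  have hL : ((List.range (k + 1)).map (fun i => (parIter D i x).getD 0)).length ≤ N.length := by
    apply pv_nodup_subset_length
    · apply List.Nodup.map_on
      · intro i hi j hj hEq
        rw [List.mem_range] at hi hj
        obtain ⟨yi, hyi, _⟩ := hval i (by omega)
        obtain ⟨yj, hyj, _⟩ := hval j (by omega)
        apply hinj i (by omega) j (by omega)
        rw [hyi, hyj]
        rw [hyi, hyj] at hEq
        simpa using hEq
      · exact List.nodup_range
    · intro z hz
      rw [List.mem_map] at hz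
      obtain ⟨i, hi, hzi⟩ := hz
      rw [List.mem_range] at hi
      obtain ⟨y, hy, hyN⟩ := hval i (by omega)
      rw [hy] at hzi
      simpa [← hzi] using hyN
  simpa using hL

theorem pvWalk_sound {D : PySem.Dict Int (PySem.Dict Int Int)} {good : PySem.Set Int} {R : Int}
    (hgood : ∀ g ∈ good, pvReaches D R g) :
    ∀ f (seen : PySem.Set Int) (cur : Int) (out : PySem.Set Int),
      (∀ s ∈ seen, ∃ j, 0 < j ∧ parIter D j s = some cur) →
      pvWalk D good f seen cur = some out →
      pvReaches D R cur ∧ ∀ s ∈ out, pvReaches D R s := by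
  intro f
  induction f with
  | zero => intro seen cur out _ h; cases h
  | succ f ih =>
    intro seen cur out hseen h
    rw [pvWalk] at h
    by_cases hg : PySem.Set.contains good cur = true
    · rw [if_pos hg] at h
      have hout : out = seen := by cases h; rfl
      have hcur : pvReaches D R cur := hgood cur ((PySem.Set.contains_iff good cur).mp hg)
      subst hout
      refine ⟨hcur, fun s hs => ?_⟩
      obtain ⟨j, _, hj⟩ := hseen s hs
      obtain ⟨r, hr⟩ := hcur
      refine ⟨j + r, ?_⟩
      rw [parIter_add, hj]
      simpa using hr
    · rw [if_neg hg] at h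
      by_cases hs : PySem.Set.contains seen cur = true
      · rw [if_pos hs] at h; cases h
      · rw [if_neg hs] at h
        cases hp : pvParent D cur with
        | none => rw [hp] at h; cases h
        | some p =>
          rw [hp] at h
          have hseen' : ∀ s ∈ PySem.Set.add seen cur, ∃ j, 0 < j ∧ parIter D j s = some p := by
            intro s hmem
            rw [PySem.Set.mem_add] at hmem
            rcases hmem with hmem | hmem
            · obtain ⟨j, hj0, hj⟩ := hseen s hmem
              refine ⟨j + 1, by omega, ?_⟩
              rw [parIter_add, hj]
              simp [parIter, hp]
            · subst hmem
              exact ⟨1, by omega, by simp [parIter, hp]⟩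
          obtain ⟨hpR, hout⟩ := ih _ _ _ hseen' h
          refine ⟨?_, hout⟩
          obtain ⟨r, hr⟩ := hpR
          exact ⟨r + 1, by rw [parIter_succ_of_parent D hp]; exact hr⟩

theorem pvWalk_complete {D : PySem.Dict Int (PySem.Dict Int Int)} {good : PySem.Set Int} {R : Int}
    (hRg : PySem.Set.contains good R = true) (hR : pvParent D R = none) :
    ∀ k (f : Nat) (cur : Int) (seen : PySem.Set Int),
      parIter D k cur = some R →
      (∀ s ∈ seen, ∃ j, 0 < j ∧ parIter D j s = some cur) →
      k < f → ∃ out, pvWalk D good f seen cur = some out := by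
  intro k
  induction k with
  | zero =>
    intro f cur seen hk _ hf
    have hcur : cur = R := by simpa [parIter] using hk
    subst hcur
    obtain ⟨f', rfl⟩ : ∃ f', f = f' + 1 := ⟨f - 1, by omega⟩
    exact ⟨seen, by rw [pvWalk, if_pos hRg]⟩
  | succ k ih =>
    intro f cur seen hk hseen hf
    obtain ⟨f', rfl⟩ : ∃ f', f = f' + 1 := ⟨f - 1, by omega⟩
    by_cases hg : PySem.Set.contains good cur = true
    · exact ⟨seen, by rw [pvWalk, if_pos hg]⟩
    · have hsc : PySem.Set.contains seen cur = false := by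
        by_contra hcon
        have hcon' : PySem.Set.contains seen cur = true := by
          cases h : PySem.Set.contains seen cur
          · exact absurd h hcon
          · rfl
        obtain ⟨j, hj0, hj⟩ := hseen cur ((PySem.Set.contains_iff seen cur).mp hcon')
        exact pv_no_reach_of_cycle hR hj0 hj ⟨k + 1, hk⟩
      cases hp : pvParent D cur with
      | none => rw [parIter] at hk; rw [hp] at hk; cases hk
      | some p =>
        have hk' : parIter D k p = some R := by
          rw [parIter_succ_of_parent D hp] at hk
          exact hk
        have hseen' : ∀ s ∈ PySem.Set.add seen cur, ∃ j, 0 < j ∧ parIter D j s = some p := by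
          intro s hmem
          rw [PySem.Set.mem_add] at hmem
          rcases hmem with hmem | hmem
          · obtain ⟨j, hj0, hj⟩ := hseen s hmem
            refine ⟨j + 1, by omega, ?_⟩
            rw [parIter_add, hj]
            simp [parIter, hp]
          · subst hmem
            exact ⟨1, by omega, by simp [parIter, hp]⟩
        obtain ⟨out, hout⟩ := ih f' p (PySem.Set.add seen cur) hk' hseen' (by omega)
        exact ⟨out, by rw [pvWalk, if_neg hg, if_neg (by rw [hsc]; simp), hp]; exact hout⟩

theorem pvClimb_iff {D : PySem.Dict Int (PySem.Dict Int Int)} {R : Int} {N : List Int}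
    (hR : pvParent D R = none)
    (hpar : ∀ n ∈ N, n ≠ R → ∃ p, pvParent D n = some p ∧ p ∈ N) :
    ∀ (rest : List Int) (good : PySem.Set Int),
      (∀ n ∈ rest, n ∈ N) → (∀ g ∈ good, pvReaches D R g) →
      PySem.Set.contains good R = true →
      (pvClimb D (N.length + 1) good rest = true ↔ ∀ n ∈ rest, pvReaches D R n) := by
  intro rest
  induction rest with
  | nil => intro good _ _ _; simp [pvClimb]
  | cons n rest ih =>
    intro good hrest hgood hRg
    by_cases hreach : pvReaches D R n
    · obtain ⟨k, hkN, hk⟩ := pv_reach_bound (hrest n (by simp)) hpar hreach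
      obtain ⟨out, hout⟩ :=
        pvWalk_complete hRg hR k (N.length + 1) n PySem.Set.empty hk (by simp) (by omega)
      obtain ⟨_, houtR⟩ := pvWalk_sound hgood _ _ _ _ (by simp) hout
      rw [pvClimb, hout]
      rw [ih (PySem.Set.update good out) (fun m hm => hrest m (by simp [hm]))
        (by intro g hg
            rw [PySem.Set.mem_update] at hg
            rcases hg with hg | hg
            · exact hgood g hg
            · exact houtR g hg)
        (by rw [PySem.Set.contains_iff] at hRg ⊢
            rw [PySem.Set.mem_update]
            exact Or.inl hRg)]
      constructor
      · intro h m hm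
        rcases List.mem_cons.mp hm with hm | hm
        · exact hm ▸ hreach
        · exact h m hm
      · intro h m hm
        exact h m (by simp [hm])
    · rw [pvClimb]
      cases hout : pvWalk D good (N.length + 1) PySem.Set.empty n with
      | none =>
        simp only [Bool.false_eq_true, false_iff]
        intro h
        exact hreach (h n (by simp))
      | some out =>
        exact absurd (pvWalk_sound hgood _ _ _ _ (by simp) hout).1 hreach

-- std construction: success + key preservation + inner-keys Nodup + adjacency
theorem pvAddEdges_spec (node : Int) :
    ∀ (preds : List (Int × Int)) (std : PySem.Dict Int (PySem.Dict Int Int)),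
      (∀ q ∈ preds, std.contains q.1 = true) →
      (∀ x, (std.getD x PySem.Dict.empty).keys.Nodup) →
      ∃ std', pvAddEdges node std preds = some std' ∧
        (∀ x, std'.contains x = std.contains x) ∧
        (∀ x, (std'.getD x PySem.Dict.empty).keys.Nodup) ∧
        (∀ x y, y ∈ (std'.getD x PySem.Dict.empty).keys ↔
          y ∈ (std.getD x PySem.Dict.empty).keys ∨ (y = node ∧ ∃ w, (x, w) ∈ preds)) := by
  intro preds
  induction preds with
  | nil =>
    intro std _ hnd
    exact ⟨std, rfl, fun _ => rfl, hnd, by simp⟩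
  | cons q rest ih =>
    intro std hc hnd
    obtain ⟨src, w⟩ := q
    have hsrc : std.contains src = true := hc (src, w) (by simp)
    have hstep : pvAddEdges node std ((src, w) :: rest) =
        pvAddEdges node (std.modify src PySem.Dict.empty (fun m => m.insert node w)) rest := by
      rw [pvAddEdges, if_pos hsrc]
    set std1 := std.modify src PySem.Dict.empty (fun m => m.insert node w) with hstd1
    have hgetD : ∀ x, std1.getD x PySem.Dict.empty =
        if x = src then (std.getD src PySem.Dict.empty).insert node w
        else std.getD x PySem.Dict.empty := by
      intro x
      rw [hstd1, PySem.Dict.getD_modify]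
    have hcont1 : ∀ x, std1.contains x = std.contains x := by
      intro x
      rw [hstd1, PySem.Dict.contains_modify]
      by_cases hx : x = src
      · subst hx; simp [hsrc]
      · simp [hx]
    obtain ⟨std', heq, hcont, hnd', hadj⟩ := ih std1
      (by intro q hq; rw [hcont1]; exact hc q (by simp [hq]))
      (by intro x
          rw [hgetD]
          by_cases hx : x = src
          · rw [if_pos hx]
            exact PySem.Dict.nodup_keys_insert _ _ _ (hnd src)
          · rw [if_neg hx]; exact hnd x)
    refine ⟨std', by rw [hstep]; exact heq, fun x => (hcont x).trans (hcont1 x), hnd', ?_⟩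
    intro x y
    rw [hadj x y, hgetD]
    by_cases hx : x = src
    · subst hx
      rw [if_pos rfl]
      rw [PySem.Dict.mem_keys_insert]
      constructor
      · rintro ((h | h) | ⟨rfl, w', hw'⟩)
        · exact Or.inr ⟨h, w, by simp⟩
        · exact Or.inl h
        · exact Or.inr ⟨rfl, w', by simp [hw']⟩
      · rintro (h | ⟨rfl, w', hw'⟩)
        · exact Or.inl (Or.inr h)
        · exact Or.inl (Or.inl rfl)
    · rw [if_neg hx]
      constructor
      · rintro (h | ⟨rfl, w', hw'⟩)
        · exact Or.inl h
        · exact Or.inr ⟨rfl, w', by simp [hw']⟩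
      · rintro (h | ⟨rfl, w', hw'⟩)
        · exact Or.inl h
        · rcases List.mem_cons.mp hw' with h1 | h1
          · cases h1; exact absurd rfl hx
          · exact Or.inr ⟨rfl, w', h1⟩

theorem pvBuildStd_spec :
    ∀ (items : List (Int × PySem.Dict Int Int)) (std : PySem.Dict Int (PySem.Dict Int Int)),
      (∀ p ∈ items, ∀ q ∈ p.2.items, std.contains q.1 = true) →
      (∀ x, (std.getD x PySem.Dict.empty).keys.Nodup) →
      ∃ std', pvBuildStd items std = some std' ∧
        (∀ x, std'.contains x = std.contains x) ∧
        (∀ x, (std'.getD x PySem.Dict.empty).keys.Nodup) ∧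
        (∀ x y, y ∈ (std'.getD x PySem.Dict.empty).keys ↔
          y ∈ (std.getD x PySem.Dict.empty).keys ∨
          ∃ preds, (y, preds) ∈ items ∧ x ∈ preds.keys) := by
  intro items
  induction items with
  | nil =>
    intro std _ hnd
    exact ⟨std, rfl, fun _ => rfl, hnd, by simp⟩
  | cons p rest ih =>
    intro std hc hnd
    obtain ⟨node, preds⟩ := p
    obtain ⟨std1, heq1, hcont1, hnd1, hadj1⟩ :=
      pvAddEdges_spec node preds.items std (fun q hq => hc (node, preds) (by simp) q hq) hnd
    obtain ⟨std', heq, hcont, hnd', hadj⟩ := ih std1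
      (by intro p hp q hq; rw [hcont1]; exact hc p (by simp [hp]) q hq)
      hnd1
    refine ⟨std', ?_, fun x => (hcont x).trans (hcont1 x), hnd', ?_⟩
    · rw [pvBuildStd, heq1]
      exact heq
    · intro x y
      rw [hadj x y, hadj1 x y]
      have hkeys : (x ∈ preds.keys) ↔ ∃ w, (x, w) ∈ preds.items := by
        show x ∈ preds.items.map (·.1) ↔ _
        rw [List.mem_map]
        constructor
        · rintro ⟨q, hq, rfl⟩; exact ⟨q.2, hq⟩
        · rintro ⟨w, hw⟩; exact ⟨(x, w), hw, rfl⟩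
      constructor
      · rintro ((h | ⟨rfl, w', hw'⟩) | ⟨pr, hpr, hx⟩)
        · exact Or.inl h
        · exact Or.inr ⟨preds, by simp, hkeys.mpr ⟨w', hw'⟩⟩
        · exact Or.inr ⟨pr, by simp [hpr], hx⟩
      · rintro (h | ⟨pr, hpr, hx⟩)
        · exact Or.inl (Or.inl h)
        · rcases List.mem_cons.mp hpr with h1 | h1
          · rw [Prod.mk.injEq] at h1
            obtain ⟨rfl, rfl⟩ := h1
            exact Or.inl (Or.inr ⟨rfl, hkeys.mp hx⟩)
          · exact Or.inr ⟨pr, h1, hx⟩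

-- BFS soundness: any predicate holding on the start state and closed under edges holds on
-- the result
theorem pvBFS_sound (std : PySem.Dict Int (PySem.Dict Int Int)) (Gd : Int → Prop)
    (hcl : ∀ c y, Gd c → y ∈ (std.getD c PySem.Dict.empty).keys → Gd y) :
    ∀ f (vis : PySem.Set Int) (queue : List Int),
      (∀ v ∈ vis, Gd v) → (∀ q ∈ queue, Gd q) →
      ∀ x ∈ pvBFS std f vis queue, Gd x := by
  intro f
  induction f with
  | zero =>
    intro vis queue hvis _ x hx
    cases queue with
    | nil => exact hvis x hx
    | cons c q => exact hvis x hx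
  | succ f ih =>
    intro vis queue hvis hq x hx
    cases queue with
    | nil => exact hvis x hx
    | cons c q =>
      rw [pvBFS] at hx
      by_cases hc : PySem.Set.contains vis c = true
      · rw [if_pos hc] at hx
        exact ih vis q hvis (fun m hm => hq m (by simp [hm])) x hx
      · rw [if_neg hc] at hx
        refine ih _ _ ?_ ?_ x hx
        · intro v hv
          rw [PySem.Set.mem_add] at hv
          rcases hv with hv | hv
          · exact hvis v hv
          · exact hv ▸ hq c (by simp)
        · intro m hm
          rcases List.mem_append.mp hm with hm | hm
          · exact hq m (by simp [hm])
          · exact hcl c m (hq c (by simp)) (List.mem_of_mem_filter hm)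

-- BFS completeness: with enough fuel the result contains the start state and is closed
-- under edges
theorem pvBFS_complete (std : PySem.Dict Int (PySem.Dict Int Int)) (U : List Int) (B0 : Nat)
    (hB : ∀ c, (std.getD c PySem.Dict.empty).keys.length ≤ B0)
    (hU : ∀ c y, y ∈ (std.getD c PySem.Dict.empty).keys → y ∈ U) :
    ∀ f (vis : PySem.Set Int) (queue : List Int),
      (∀ q ∈ queue, q ∈ U) →
      (∀ v ∈ vis, ∀ y ∈ (std.getD v PySem.Dict.empty).keys, y ∈ vis ∨ y ∈ queue) →
      (U.filter (fun u => !PySem.Set.contains vis u)).length * (B0 + 1) + queue.length ≤ f →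
      (∀ v ∈ vis, v ∈ pvBFS std f vis queue) ∧
      (∀ q ∈ queue, q ∈ pvBFS std f vis queue) ∧
      (∀ v ∈ pvBFS std f vis queue, ∀ y ∈ (std.getD v PySem.Dict.empty).keys,
        y ∈ pvBFS std f vis queue) := by
  intro f
  induction f with
  | zero =>
    intro vis queue hq hproc hf
    cases queue with
    | nil =>
      refine ⟨fun v hv => hv, by simp, fun v hv y hy => ?_⟩
      rcases hproc v hv y hy with h | h
      · exact h
      · cases h
    | cons c q => simp at hf
  | succ f ih =>
    intro vis queue hq hproc hf
    cases queue with
    | nil =>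
      refine ⟨fun v hv => hv, by simp, fun v hv y hy => ?_⟩
      rcases hproc v hv y hy with h | h
      · exact h
      · cases h
    | cons c q =>
      rw [pvBFS]
      by_cases hc : PySem.Set.contains vis c = true
      · rw [if_pos hc]
        have hcv : c ∈ vis := (PySem.Set.contains_iff vis c).mp hc
        obtain ⟨h1, h2, h3⟩ := ih vis q (fun m hm => hq m (by simp [hm]))
          (by intro v hv y hy
              rcases hproc v hv y hy with h | h
              · exact Or.inl h
              · rcases List.mem_cons.mp h with h | h
                · exact Or.inl (h ▸ hcv)
                · exact Or.inr h)
          (by have := hf; simp only [List.length_cons] at this; omega)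
        exact ⟨h1, fun m hm => by
          rcases List.mem_cons.mp hm with hm | hm
          · exact hm ▸ h1 c hcv
          · exact h2 m hm, h3⟩
      · rw [if_neg hc]
        have hcU : c ∈ U := hq c (by simp)
        have hcnv : c ∉ vis := fun hmem => hc ((PySem.Set.contains_iff vis c).mpr hmem)
        -- the count of unvisited universe elements strictly decreases
        have hsub : (U.filter (fun u => !PySem.Set.contains (PySem.Set.add vis c) u)).Sublist
            (U.filter (fun u => !PySem.Set.contains vis u)) := by
          apply List.monotone_filter_right
          intro a ha
          simp only [Bool.not_eq_eq_eq_not, Bool.not_true] at ha ⊢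
          cases hcont : PySem.Set.contains vis a with
          | false => rfl
          | true =>
            exfalso
            have : a ∈ PySem.Set.add vis c := by
              rw [PySem.Set.mem_add]
              exact Or.inl ((PySem.Set.contains_iff vis a).mp hcont)
            rw [(PySem.Set.contains_iff _ a).mpr this] at ha
            cases ha
        have hcmem : c ∈ U.filter (fun u => !PySem.Set.contains vis u) := by
          rw [List.mem_filter]
          refine ⟨hcU, ?_⟩
          cases h : PySem.Set.contains vis c with
          | false => rfl
          | true => exact absurd h hc
        have hcnmem : c ∉ U.filter (fun u => !PySem.Set.contains (PySem.Set.add vis c) u) := by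
          rw [List.mem_filter]
          rintro ⟨-, h⟩
          have : c ∈ PySem.Set.add vis c := by rw [PySem.Set.mem_add]; exact Or.inr rfl
          rw [(PySem.Set.contains_iff _ c).mpr this] at h
          cases h
        have hlt : (U.filter (fun u => !PySem.Set.contains (PySem.Set.add vis c) u)).length <
            (U.filter (fun u => !PySem.Set.contains vis u)).length := by
          rcases Nat.lt_or_ge (U.filter (fun u => !PySem.Set.contains (PySem.Set.add vis c) u)).length
              (U.filter (fun u => !PySem.Set.contains vis u)).length with h | h
          · exact h
          · exfalso
            have hle := hsub.length_le
            have heq := hsub.eq_of_length (by omega)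
            rw [heq] at hcnmem
            exact hcnmem hcmem
        have hflen : ((std.getD c PySem.Dict.empty).keys.filter
            (fun n => !PySem.Set.contains (PySem.Set.add vis c) n)).length ≤ B0 :=
          le_trans (List.length_filter_le _ _) (hB c)
        obtain ⟨h1, h2, h3⟩ := ih (PySem.Set.add vis c)
          (q ++ (std.getD c PySem.Dict.empty).keys.filter
            (fun n => !PySem.Set.contains (PySem.Set.add vis c) n))
          (by intro m hm
              rcases List.mem_append.mp hm with hm | hm
              · exact hq m (by simp [hm])
              · exact hU c m (List.mem_of_mem_filter hm))
          (by intro v hv y hy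
              rw [PySem.Set.mem_add] at hv
              rcases hv with hv | hvc
              · rcases hproc v hv y hy with h | h
                · exact Or.inl (by rw [PySem.Set.mem_add]; exact Or.inl h)
                · rcases List.mem_cons.mp h with h | h
                  · exact Or.inl (by rw [PySem.Set.mem_add]; exact Or.inr h)
                  · exact Or.inr (List.mem_append.mpr (Or.inl h))
              · rw [hvc] at hy
                by_cases hyv : y ∈ PySem.Set.add vis c
                · exact Or.inl hyv
                · refine Or.inr (List.mem_append.mpr (Or.inr ?_))
                  rw [List.mem_filter]
                  refine ⟨hy, ?_⟩
                  cases h : PySem.Set.contains (PySem.Set.add vis c) y with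
                  | false => rfl
                  | true => exact absurd ((PySem.Set.contains_iff _ y).mp h) hyv)
          (by generalize hA : (U.filter (fun u =>
                !PySem.Set.contains (PySem.Set.add vis c) u)).length = A at *
              generalize hB' : (U.filter (fun u => !PySem.Set.contains vis u)).length = C at *
              rw [List.length_append]
              have e1 : (A + 1) * (B0 + 1) ≤ C * (B0 + 1) :=
                Nat.mul_le_mul_right _ (by omega)
              simp only [List.length_cons] at hf
              have e2 : A * (B0 + 1) + B0 + 1 = (A + 1) * (B0 + 1) := by ring
              omega)
        refine ⟨?_, ?_, h3⟩
        · intro v hv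
          exact h1 v (by rw [PySem.Set.mem_add]; exact Or.inl hv)
        · intro m hm
          rcases List.mem_cons.mp hm with hm | hm
          · exact hm ▸ h1 c (by rw [PySem.Set.mem_add]; exact Or.inr rfl)
          · exact h2 m (List.mem_append.mpr (Or.inl hm))

theorem pv_fold_insert_getD (l : List Int) :
    ∀ (d : PySem.Dict Int (PySem.Dict Int Int)),
      (∀ x, d.getD x PySem.Dict.empty = PySem.Dict.empty) →
      ∀ x, (l.foldl (fun s n => s.insert n PySem.Dict.empty) d).getD x PySem.Dict.empty =
        PySem.Dict.empty := by
  induction l with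
  | nil => intro d hd x; exact hd x
  | cons n l ih =>
    intro d hd x
    rw [List.foldl_cons]
    refine ih _ (fun z => ?_) x
    rw [PySem.Dict.getD_insert]
    split
    · rfl
    · exact hd z

theorem pv_fold_insert_contains (l : List Int) :
    ∀ (d : PySem.Dict Int (PySem.Dict Int Int)) (x : Int),
      ((l.foldl (fun s n => s.insert n PySem.Dict.empty) d).contains x = true ↔
        (d.contains x = true ∨ x ∈ l)) := by
  induction l with
  | nil => intro d x; simp
  | cons n l ih =>
    intro d x
    rw [List.foldl_cons, ih]
    rw [PySem.Dict.contains_insert]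
    constructor
    · rintro (h | h)
      · rcases Bool.or_eq_true_iff.mp h with h | h
        · exact Or.inr (by simp [beq_iff_eq.mp h])
        · exact Or.inl h
      · exact Or.inr (by simp [h])
    · rintro (h | h)
      · exact Or.inl (by rw [h]; simp)
      · rcases List.mem_cons.mp h with h | h
        · exact Or.inl (by rw [h]; simp)
        · exact Or.inr h

theorem pv_bool_eq {a b : Bool} (h : a = true ↔ b = true) : a = b := by
  cases a <;> cases b <;> simp_all

-- ===== VERDICT (by name: the statement is the Claim_ definition above) =====
theorem is_rdst_py_spec : Claim_equal_is_rdst_py := by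
  intro rgraph root all_nodes _ hPre
  unfold Spec_is_rdst_py
  simp only [is_rdst_py, is_rdst_py_alt]
  by_cases hc1 : ((pvDict rgraph).getD root PySem.Dict.empty).size = 0
  case neg =>
    conv_lhs => rw [if_pos hc1]
    conv_rhs => rw [if_pos hc1]
  case pos =>
  conv_lhs => rw [if_neg (fun h => h hc1)]
  conv_rhs => rw [if_neg (fun h => h hc1)]
  cases hc2 : all_nodes.all (fun node => node == root ||
      ((pvDict rgraph).contains node && ((pvDict rgraph).getD node PySem.Dict.empty).size == 1)) with
  | false => simp
  | true =>
  conv_lhs => rw [if_neg (by simp)]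
  conv_rhs => rw [if_neg (by simp)]
  set D := pvDict rgraph with hD
  set N := all_nodes with hN
  set SN := PySem.Set.ofList all_nodes with hSN
  -- the two degree checks, as propositions
  have hdeg : ∀ n ∈ N, n ≠ root → D.contains n = true ∧ (D.getD n PySem.Dict.empty).size = 1 := by
    intro n hn hne
    have := List.all_eq_true.mp hc2 n hn
    rcases Bool.or_eq_true_iff.mp this with h | h
    · exact absurd (beq_iff_eq.mp h) hne
    · obtain ⟨h1, h2⟩ := Bool.and_eq_true_iff.mp h
      exact ⟨h1, by simpa using h2⟩
  have hsrcN : ∀ p ∈ D.items, ∀ q ∈ p.2.items, q.1 ∈ N := hPre ⟨hc1, hdeg⟩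
  have hDnodup : D.keys.Nodup := PySem.Dict.nodup_keys_ofList _
  have hgetD_items : ∀ {y : Int} {preds : PySem.Dict Int Int},
      (y, preds) ∈ D.items → D.getD y PySem.Dict.empty = preds := by
    intro y preds h
    exact PySem.Dict.getD_of_mem_items D h hDnodup PySem.Dict.empty
  have hitems_getD : ∀ {y : Int}, D.contains y = true →
      (y, D.getD y PySem.Dict.empty) ∈ D.items := by
    intro y hy
    rw [PySem.Dict.contains_eq_isSome_get?] at hy
    obtain ⟨v, hv⟩ := Option.isSome_iff_exists.mp hy
    rw [PySem.Dict.getD_of_get?_eq_some D PySem.Dict.empty hv]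
    exact PySem.Dict.mem_items_of_get?_eq_some D hv
  have hRkeys : (D.getD root PySem.Dict.empty).keys = [] := by
    have : (D.getD root PySem.Dict.empty).items = [] :=
      List.length_eq_zero_iff.mp hc1
    show (D.getD root PySem.Dict.empty).items.map _ = []
    rw [this]
    rfl
  have hParR : pvParent D root = none := by
    unfold pvParent
    rw [hRkeys]
  have hParN : ∀ n ∈ N, n ≠ root → ∃ p, pvParent D n = some p ∧ p ∈ N := by
    intro n hn hne
    obtain ⟨hcn, hsz⟩ := hdeg n hn hne
    obtain ⟨q, hq⟩ := List.length_eq_one_iff.mp hsz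
    have hkeys : (D.getD n PySem.Dict.empty).keys = [q.1] := by
      show (D.getD n PySem.Dict.empty).items.map _ = _
      rw [hq]
      rfl
    refine ⟨q.1, by unfold pvParent; rw [hkeys], ?_⟩
    exact hsrcN (n, D.getD n PySem.Dict.empty) (hitems_getD hcn) q (by rw [hq]; simp)
  have hParKeys : ∀ {x p : Int}, pvParent D x = some p →
      (D.getD x PySem.Dict.empty).keys = [p] := by
    intro x p h
    unfold pvParent at h
    split at h
    · cases h; assumption
    · cases h
  -- build the standard representation
  obtain ⟨std, hstd, hstdcont, hstdnd, hstdadj0⟩ := pvBuildStd_spec D.items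
    (all_nodes.foldl (fun s n => s.insert n PySem.Dict.empty) PySem.Dict.empty)
    (by intro p hp q hq
        rw [pv_fold_insert_contains]
        exact Or.inr (hsrcN p hp q hq))
    (by intro x
        rw [pv_fold_insert_getD _ _ (fun x => PySem.Dict.getD_empty ..)]
        exact List.nodup_nil)
  rw [hstd]
  have hadj : ∀ x y, y ∈ (std.getD x PySem.Dict.empty).keys ↔
      ∃ preds, (y, preds) ∈ D.items ∧ x ∈ preds.keys := by
    intro x y
    rw [hstdadj0 x y, pv_fold_insert_getD _ _ (fun x => PySem.Dict.getD_empty ..)]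
    simp [PySem.Dict.keys_empty]
  -- BFS: with the fuel the port passes, the visited set contains root and is edge-closed
  have hadjsub : ∀ c y, y ∈ (std.getD c PySem.Dict.empty).keys → y ∈ D.keys := by
    intro c y hy
    obtain ⟨preds, hp, _⟩ := (hadj c y).mp hy
    exact PySem.Dict.mem_keys_of_mem_items D hp
  obtain ⟨-, hVq, hVcl⟩ := pvBFS_complete std (root :: D.keys) D.keys.length
    (fun c => pv_nodup_subset_length (hstdnd c) (hadjsub c))
    (fun c y hy => List.mem_cons.mpr (Or.inr (hadjsub c y hy)))
    ((D.keys.length + 1) * (D.keys.length + 2) + 1) PySem.Set.empty [root]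
    (by intro q hq; rcases List.mem_cons.mp hq with h | h
        · exact h ▸ List.mem_cons_self ..
        · cases h)
    (by intro v hv; cases hv)
    (by have h1 : ((root :: D.keys).filter
          (fun u => !PySem.Set.contains PySem.Set.empty u)).length = D.keys.length + 1 := by
          have : ((root :: D.keys).filter (fun u => !PySem.Set.contains PySem.Set.empty u)) =
              root :: D.keys := List.filter_eq_self.mpr (fun a _ => rfl)
          rw [this]
          simp
        rw [h1]
        have h2 : (D.keys.length + 1) * (D.keys.length + 1) ≤
            (D.keys.length + 1) * (D.keys.length + 2) := by
          exact Nat.mul_le_mul_left _ (by omega)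
        simp only [List.length_cons, List.length_nil]
        omega)
  set V := pvBFS std ((D.keys.length + 1) * (D.keys.length + 2) + 1) PySem.Set.empty [root]
    with hV
  have hVR : root ∈ V := hVq root (List.mem_cons_self ..)
  -- edges go into SN whenever no stray target exists; edge targets give parents
  have hedge_par : ∀ c y, y ∈ (std.getD c PySem.Dict.empty).keys →
      (∀ p ∈ D.items, p.2.size ≠ 0 → p.1 ∈ SN) → pvParent D y = some c := by
    intro c y hy hns
    obtain ⟨preds, hp, hck⟩ := (hadj c y).mp hy
    have hsz : preds.size ≠ 0 := by
      intro h0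
      have : preds.items = [] := List.length_eq_zero_iff.mp h0
      have : preds.keys = [] := by show preds.items.map _ = []; rw [this]; rfl
      rw [this] at hck
      cases hck
    have hySN : y ∈ SN := hns (y, preds) hp hsz
    have hyN : y ∈ N := by rwa [hSN, PySem.Set.mem_ofList] at hySN
    have hyR : y ≠ root := by
      intro hEq
      have : preds = D.getD root PySem.Dict.empty := (hgetD_items (hEq ▸ hp)).symm
      rw [this] at hck
      rw [hRkeys] at hck
      cases hck
    obtain ⟨p, hpv, -⟩ := hParN y hyN hyR
    have hkeys := hParKeys hpv
    have hpreds : preds = D.getD y PySem.Dict.empty := (hgetD_items hp).symm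
    rw [hpreds] at hck
    rw [hkeys] at hck
    rcases List.mem_cons.mp hck with h | h
    · rw [h]; exact hpv
    · cases h
  -- every chain that reaches root is visited
  have hreachV : ∀ k (x : Int), parIter D k x = some root → x ∈ V := by
    intro k
    induction k with
    | zero =>
      intro x hx
      have : x = root := by simpa [parIter] using hx
      exact this ▸ hVR
    | succ k ih =>
      intro x hx
      rw [parIter] at hx
      cases hp : pvParent D x with
      | none => rw [hp] at hx; cases hx
      | some p =>
        rw [hp] at hx
        have hpV : p ∈ V := ih p hx
        have hkeys := hParKeys hp
        have hcx : D.contains x = true := by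
          cases h : D.contains x with
          | true => rfl
          | false =>
            have : D.getD x PySem.Dict.empty = PySem.Dict.empty :=
              PySem.Dict.getD_of_not_contains D PySem.Dict.empty h
            rw [this] at hkeys
            rw [PySem.Dict.keys_empty] at hkeys
            cases hkeys
        have hxadj : x ∈ (std.getD p PySem.Dict.empty).keys := by
          rw [hadj]
          exact ⟨D.getD x PySem.Dict.empty, hitems_getD hcx, by rw [hkeys]; simp⟩
        exact hVcl p hpV x hxadj
  -- characterization of A's verdict
  have hAiff : PySem.Set.equal V SN = true ↔
      (root ∈ SN ∧ (∀ p ∈ D.items, p.2.size ≠ 0 → p.1 ∈ SN) ∧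
        ∀ n ∈ N, pvReaches D root n) := by
    constructor
    · intro hEq
      have hmem := (PySem.Set.equal_iff V SN).mp hEq
      have hRSN : root ∈ SN := (hmem root).mp hVR
      have hns : ∀ p ∈ D.items, p.2.size ≠ 0 → p.1 ∈ SN := by
        intro p hp hsz
        obtain ⟨q, hq⟩ : ∃ q, q ∈ p.2.items := by
          cases h : p.2.items with
          | nil =>
            exact absurd (show p.2.size = 0 from by show p.2.items.length = 0; rw [h]; rfl) hsz
          | cons a l => exact ⟨a, List.mem_cons_self ..⟩
        have hxN : q.1 ∈ N := hsrcN p hp q hq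
        have hxV : q.1 ∈ V := (hmem q.1).mpr (by rwa [hSN, PySem.Set.mem_ofList])
        have hp1 : p.1 ∈ (std.getD q.1 PySem.Dict.empty).keys := by
          rw [hadj]
          exact ⟨p.2, by rwa [← Prod.mk.eta (p := p)] at hp, by
            show q.1 ∈ p.2.items.map _
            exact List.mem_map.mpr ⟨q, hq, rfl⟩⟩
        exact (hmem p.1).mp (hVcl q.1 hxV p.1 hp1)
      refine ⟨hRSN, hns, ?_⟩
      intro n hn
      have hnV : n ∈ V := (hmem n).mpr (by rwa [hSN, PySem.Set.mem_ofList])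
      refine pvBFS_sound std (pvReaches D root) ?_ _ _ _ (by intro v hv; cases hv) ?_ n hnV
      · intro c y hc hy
        obtain ⟨r, hr⟩ := hc
        exact ⟨r + 1, by rw [parIter_succ_of_parent D (hedge_par c y hy hns)]; exact hr⟩
      · intro q hq
        rcases List.mem_cons.mp hq with h | h
        · exact h ▸ ⟨0, rfl⟩
        · cases h
    · rintro ⟨hRSN, hns, hall⟩
      rw [PySem.Set.equal_iff]
      intro x
      constructor
      · intro hx
        refine pvBFS_sound std (· ∈ SN) ?_ _ _ _ (by intro v hv; cases hv) ?_ x hx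
        · intro c y hc hy
          obtain ⟨preds, hp, hck⟩ := (hadj c y).mp hy
          refine hns (y, preds) hp ?_
          intro h0
          have : preds.items = [] := List.length_eq_zero_iff.mp h0
          have hk : preds.keys = [] := by show preds.items.map _ = []; rw [this]; rfl
          rw [hk] at hck
          cases hck
        · intro q hq
          rcases List.mem_cons.mp hq with h | h
          · exact h ▸ hRSN
          · cases h
      · intro hx
        have hxN : x ∈ N := by rwa [hSN, PySem.Set.mem_ofList] at hx
        obtain ⟨k, hk⟩ := hall x hxN
        exact hreachV k x hk
  -- now case on B's two extra checks
  cases hRc : PySem.Set.contains SN root with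
  | false =>
    rw [if_pos (by rfl)]
    apply pv_bool_eq
    simp only [Bool.false_eq_true, iff_false]
    intro hEq
    have := (hAiff.mp hEq).1
    rw [(PySem.Set.contains_iff SN root).mpr this] at hRc
    cases hRc
  | true =>
    rw [if_neg (by simp)]
    cases hstray : D.items.any (fun p => p.2.size != 0 && !(PySem.Set.contains SN p.1)) with
    | true =>
      rw [if_pos rfl]
      apply pv_bool_eq
      simp only [Bool.false_eq_true, iff_false]
      intro hEq
      obtain ⟨p, hp, hpb⟩ := List.any_eq_true.mp hstray
      obtain ⟨h1, h2⟩ := Bool.and_eq_true_iff.mp hpb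
      have hsz : p.2.size ≠ 0 := by simpa using h1
      have := (hAiff.mp hEq).2.1 p hp hsz
      rw [(PySem.Set.contains_iff SN p.1).mpr this] at h2
      cases h2
    | false =>
      rw [if_neg (by simp)]
      have hns : ∀ p ∈ D.items, p.2.size ≠ 0 → p.1 ∈ SN := by
        intro p hp hsz
        have := List.any_eq_false.mp hstray p hp
        rw [Bool.not_eq_true, Bool.and_eq_false_iff] at this
        rcases this with h | h
        · exact absurd (by simpa using h) hsz
        · rw [Bool.not_eq_false'] at h
          exact (PySem.Set.contains_iff SN p.1).mp h
      apply pv_bool_eq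
      rw [hAiff]
      rw [pvClimb_iff hParR hParN N (PySem.Set.add PySem.Set.empty root)
        (fun n hn => hn)
        (by intro g hg
            rw [PySem.Set.mem_add] at hg
            rcases hg with hg | hg
            · cases hg
            · exact hg ▸ ⟨0, rfl⟩)
        (by rw [PySem.Set.contains_iff, PySem.Set.mem_add]; exact Or.inr rfl)]
      constructor
      · rintro ⟨-, -, h⟩; exact h
      · intro h
        exact ⟨(PySem.Set.contains_iff SN root).mp hRc, hns, h⟩
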